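-- pv_equiv track=rewrite | github.com/ezw678/CodeSignal | Arcade/Intro/Python/arcade_universe_intro.py | is_beautiful_str
-- ===== SOURCE A (Python) =====
-- from collections import Counter
-- from collections import Counter
--
-- def is_beautiful_str(inputString):
--     if len(inputString) == 0:
--         return True
--
--     counter = Counter(inputString)
--     lst = [(k, v) for k, v in counter.items()]
--     lst.sort(key=lambda x: x[0])
--
--     if lst[0][0] != "a":
--         return False
--
--     for i in range(len(lst) - 1):
--         cur_char, cur_count = lst[i]
--         next_char, next_count = lst[i + 1]
--
--         if ord(next_char) - ord(cur_char) > 1 or next_count > cur_count: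
--             return False
--
--     return True
-- ===== SOURCE B (Python) =====
-- from collections import Counter
--
-- def is_beautiful_str(inputString):
--     counter = Counter(inputString)
--     code = ord('a')
--     prev = len(inputString)          # no count can exceed the total length
--     seen = 0
--     while counter[chr(code)] > 0:
--         cnt = counter[chr(code)]
--         if cnt > prev:
--             return False
--         prev = cnt
--         seen += cnt
--         code += 1
--     return seen == len(inputString)
-- ===== Notes on version B (the rewrite author's own statement) =====
-- stated objective: alternative
-- what changed: Instead of sorting the Counter's distinct characters and comparing every adjacent pair, B walks the alphabet sequentially from the first lowercase letter while the next letter's count is positive, checking counts are non-increasing and finally that the consumed total equals the string length.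
import Mathlib
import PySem

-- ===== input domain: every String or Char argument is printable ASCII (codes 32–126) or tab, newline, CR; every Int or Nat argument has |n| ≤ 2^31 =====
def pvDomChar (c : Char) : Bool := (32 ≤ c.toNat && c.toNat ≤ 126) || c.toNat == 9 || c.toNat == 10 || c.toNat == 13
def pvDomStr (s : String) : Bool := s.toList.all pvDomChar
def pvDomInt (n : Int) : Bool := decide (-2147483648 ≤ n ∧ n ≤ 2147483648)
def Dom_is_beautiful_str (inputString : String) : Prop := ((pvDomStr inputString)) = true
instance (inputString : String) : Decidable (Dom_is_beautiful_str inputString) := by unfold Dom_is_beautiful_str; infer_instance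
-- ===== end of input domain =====

-- B replaces "sort the distinct characters and compare adjacent pairs" by a single
-- sequential walk of the alphabet from 'a' that consumes the Counter; objective: alternative.


-- ===== PORT A =====
-- A's loop 'for i in range(len(lst) - 1)' reading lst[i], lst[i+1]: recursion on adjacent pairs
def pvChainA : List (Char × Int) → Bool
  | p :: q :: rest =>
      if ((q.1.toNat : Int) - (p.1.toNat : Int) > 1 || decide (q.2 > p.2)) then false
      else pvChainA (q :: rest)
  | _ => true

def is_beautiful_str (inputString : String) : Bool :=
  let cs := inputString.toList
  if cs.length = 0 then true
  else
    let counter := PySem.Dict.counter cs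
    let lst := PySem.List.sorted counter.items (fun x => x.1) false
    match lst with
    | [] => true  -- Python's lst[0] would raise IndexError; unreachable since cs ≠ []
    | p :: rest => if p.1 != 'a' then false else pvChainA (p :: rest)

-- ===== PORT B =====
-- B's 'while counter[chr(code)] > 0' loop; the fuel argument only guards termination
-- (the loop runs at most once per distinct letter, so fuel = len + 1 is never exhausted)
def pvWalkB (counter : PySem.Dict Char Int) (total : Int) : Nat → Nat → Int → Int → Bool
  | 0, _, _, seen => seen == total
  | fuel + 1, code, prev, seen =>
      let cnt := counter.getD (Char.ofNat code) 0
      if 0 < cnt then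
        if prev < cnt then false
        else pvWalkB counter total fuel (code + 1) cnt (seen + cnt)
      else seen == total

def is_beautiful_str_alt (inputString : String) : Bool :=
  let cs := inputString.toList
  let counter := PySem.Dict.counter cs
  pvWalkB counter (cs.length : Int) (cs.length + 1) 97 (cs.length : Int) 0

-- ===== PRECONDITION & SPEC =====
def Spec_is_beautiful_str (inputString : String) (out : Bool) : Prop := out = is_beautiful_str_alt inputString
instance (inputString : String) (out : Bool) : Decidable (Spec_is_beautiful_str inputString out) := by unfold Spec_is_beautiful_str; infer_instance

-- ===== CLAIM (what is proved, stated in full; the proofs are below) =====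
def Claim_equal_is_beautiful_str : Prop := ∀ (inputString : String), Dom_is_beautiful_str inputString → Spec_is_beautiful_str inputString (is_beautiful_str inputString)

-- ===== LEMMAS AND PROOFS =====

-- reference chain: the sorted distinct letters ds must start at `code` and run contiguously
-- with non-increasing counts bounded by `prev`
def pvChainB (cnt : Char → Int) : Int → Nat → List Char → Bool
  | _, _, [] => true
  | prev, code, c :: rest =>
      if c.toNat = code ∧ cnt c ≤ prev then pvChainB cnt (cnt c) (code + 1) rest else false

theorem pvChar_lt_iff (c d : Char) : c < d ↔ c.toNat < d.toNat := by
  rw [Char.lt_def, UInt32.lt_iff_toNat_lt]; rfl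

theorem pvToNat_ofNat (n : Nat) (h : n ≤ 127) : (Char.ofNat n).toNat = n := by
  rw [Char.toNat_ofNat, if_pos]; exact Or.inl (by omega)

-- the Counter lookup of B, as a count
theorem pvCnt_eq (cs : List Char) (c : Char) :
    (PySem.Dict.counter cs).getD c 0 = (cs.count c : Int) := by
  simp [PySem.Dict.getD_counter]

-- sum of the counts over any duplicate-free enumeration of the support is the length
theorem pvSum_counts (cs ds : List Char) (hnd : ds.Nodup) (hm : ∀ c, c ∈ ds ↔ c ∈ cs) :
    (ds.map (fun c => (cs.count c : Int))).sum = (cs.length : Int) := by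
  have h3 : ds.toFinset = cs.toFinset := by
    ext c; simp [List.mem_toFinset, hm c]
  have h2 : (ds.map (fun c => cs.count c)).sum = cs.length := by
    rw [← List.sum_toFinset _ hnd, h3]
    simp
  have h1 : (ds.map (fun c => (cs.count c : Int))).sum
      = ((ds.map (fun c => cs.count c)).sum : Int) := by
    rw [Nat.cast_list_sum, List.map_map]; rfl
  rw [h1, h2]

-- main walk lemma: B's loop over the remaining sorted block ds (all ≥ code), with lo the
-- distinct characters below 'a'
theorem pvWalk_eq (cs lo : List Char) :
    ∀ (ds : List Char) (fuel code : Nat) (prev seen : Int),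
      ds.Pairwise (· < ·) →
      (∀ c ∈ ds, 0 < cs.count c) →
      (∀ c ∈ lo, 0 < cs.count c) →
      (∀ c : Char, code ≤ c.toNat → c ∉ ds → cs.count c = 0) →
      (∀ c ∈ ds, code ≤ c.toNat ∧ c.toNat ≤ 126) →
      97 ≤ code → code ≤ 127 →
      seen + ((lo.map (fun c => (cs.count c : Int))).sum
            + (ds.map (fun c => (cs.count c : Int))).sum) = (cs.length : Int) →
      ds.length < fuel →
      pvWalkB (PySem.Dict.counter cs) (cs.length : Int) fuel code prev seen
        = (pvChainB (fun c => (cs.count c : Int)) prev code ds && decide (lo = [])) := by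
  have hlosum : 0 ≤ (lo.map (fun c => (cs.count c : Int))).sum :=
    List.sum_nonneg (by intro x hx; simp only [List.mem_map] at hx
                        obtain ⟨c, _, rfl⟩ := hx; positivity)
  intro ds
  induction ds with
  | nil =>
    intro fuel code prev seen _ _ hposl hzero _ h97 h127 hsum hfuel
    cases fuel with
    | zero => omega
    | succ f =>
      have hc0 : (PySem.Dict.counter cs).getD (Char.ofNat code) 0 = 0 := by
        rw [pvCnt_eq]
        norm_cast
        exact hzero _ (by rw [pvToNat_ofNat _ h127]) (by simp)
      simp only [pvWalkB, hc0, lt_irrefl, if_false, pvChainB, Bool.true_and]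
      cases lo with
      | nil =>
        simp only [List.map_nil, List.sum_nil] at hsum
        have : seen = (cs.length : Int) := by omega
        simp [this]
      | cons x xs =>
        have hx : 0 < (cs.count x : Int) := by
          exact_mod_cast hposl x (by simp)
        have hxs : 0 ≤ (xs.map (fun c => (cs.count c : Int))).sum :=
          List.sum_nonneg (by intro y hy; simp only [List.mem_map] at hy
                              obtain ⟨c, _, rfl⟩ := hy; positivity)
        simp only [List.map_cons, List.sum_cons, List.map_nil, List.sum_nil] at hsum
        have hne : seen ≠ (cs.length : Int) := by omega
        simp [hne]
  | cons c rest ih =>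
    intro fuel code prev seen hsort hposd hposl hzero hrange h97 h127 hsum hfuel
    cases fuel with
    | zero => simp at hfuel
    | succ f =>
      have hcr : code ≤ c.toNat := (hrange c (by simp)).1
      have hc126 : c.toNat ≤ 126 := (hrange c (by simp)).2
      have hrest : ∀ d ∈ rest, c < d := (List.pairwise_cons.mp hsort).1
      have hrestsum : 0 ≤ (rest.map (fun x => (cs.count x : Int))).sum :=
        List.sum_nonneg (by intro y hy; simp only [List.mem_map] at hy
                            obtain ⟨d, _, rfl⟩ := hy; positivity)
      have hcpos : 0 < (cs.count c : Int) := by exact_mod_cast hposd c (by simp)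
      simp only [List.map_cons, List.sum_cons] at hsum
      by_cases hcc : c.toNat = code
      · have hchr : Char.ofNat code = c := by rw [← hcc, Char.ofNat_toNat]
        simp only [pvWalkB, hchr, pvCnt_eq]
        rw [if_pos hcpos]
        by_cases hpr : (cs.count c : Int) ≤ prev
        · rw [if_neg (not_lt.mpr hpr)]
          rw [ih f (code + 1) (cs.count c : Int) (seen + (cs.count c : Int))
                (List.pairwise_cons.mp hsort).2
                (fun d hd => hposd d (by simp [hd]))
                hposl
                (by intro d hge hnm
                    by_cases hdc : d = c
                    · subst hdc; omega
                    · exact hzero d (by omega) (by simp [hnm, hdc]))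
                (by intro d hd
                    have h1 := (pvChar_lt_iff c d).mp (hrest d hd)
                    have h2 := (hrange d (by simp [hd])).2
                    omega)
                (by omega) (by omega)
                (by omega)
                (by simp at hfuel ⊢; omega)]
          have hcond : c.toNat = code ∧ ((cs.count c : Int)) ≤ prev := ⟨hcc, hpr⟩
          simp only [pvChainB]
          rw [if_pos hcond]
        · rw [if_pos (not_le.mp hpr)]
          have : ¬ (c.toNat = code ∧ (cs.count c : Int) ≤ prev) := by
            intro h; exact hpr h.2
          simp [pvChainB, this]
      · -- code < c.toNat: the walk stops here with characters still unconsumed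
        have hlt : code < c.toNat := by omega
        have hc0 : (PySem.Dict.counter cs).getD (Char.ofNat code) 0 = 0 := by
          rw [pvCnt_eq]
          norm_cast
          refine hzero _ (by rw [pvToNat_ofNat _ h127]) ?_
          intro hmem
          have htn : (Char.ofNat code).toNat = code := pvToNat_ofNat _ h127
          rcases List.mem_cons.mp hmem with h | h
          · rw [h] at htn; omega
          · have := (pvChar_lt_iff c _).mp (hrest _ h)
            omega
        simp only [pvWalkB, hc0, lt_irrefl, if_false]
        have hne : seen ≠ (cs.length : Int) := by omega
        have hcond : ¬ (c.toNat = code ∧ (cs.count c : Int) ≤ prev) := by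
          intro h; omega
        simp [pvChainB, hcond, hne]

-- A's adjacent-pair loop over a strictly sorted block equals B's contiguous walk
theorem pvChain_eq (cnt : Char → Int) :
    ∀ (ds : List Char) (c : Char), (c :: ds).Pairwise (· < ·) →
      pvChainA ((c, cnt c) :: ds.map (fun d => (d, cnt d)))
        = pvChainB cnt (cnt c) (c.toNat + 1) ds := by
  intro ds
  induction ds with
  | nil => intro c _; rfl
  | cons d rest ih =>
    intro c hp
    have hcd : c.toNat < d.toNat :=
      (pvChar_lt_iff c d).mp ((List.pairwise_cons.mp hp).1 d (by simp))
    simp only [List.map_cons, pvChainA, pvChainB]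
    by_cases hA : d.toNat = c.toNat + 1
    · by_cases hB : cnt d ≤ cnt c
      · have h1 : ¬ ((d.toNat : Int) - (c.toNat : Int) > 1) := by omega
        have h2 : ¬ (cnt d > cnt c) := not_lt.mpr hB
        rw [if_neg (by simp [h1, h2]), if_pos ⟨hA, hB⟩]
        rw [ih d (List.pairwise_cons.mp hp).2, hA]
      · have h2 : cnt d > cnt c := not_le.mp hB
        rw [if_pos (by simp [h2]), if_neg (by intro h; exact hB h.2)]
    · have h1 : (d.toNat : Int) - (c.toNat : Int) > 1 := by omega
      rw [if_pos (by simp [h1]), if_neg (by intro h; exact hA h.1)]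

-- sorted counter items = sorted distinct characters, each paired with its count
theorem pvSorted_items (cs : List Char) :
    PySem.List.sorted (PySem.Dict.counter cs).items (fun x => x.1) false
      = (PySem.List.sorted (PySem.Set.ofList cs) (fun x => x) false).map
          (fun k => (k, (cs.count k : Int))) := by
  apply PySem.List.sorted_eq_of_perm_of_pairwise_lt
  · rw [PySem.Dict.items_counter]
    exact (PySem.List.sorted_perm _ _ _).map _
  · rw [List.pairwise_map]
    exact PySem.List.sorted_ofList_pairwise_lt cs

-- the whole nonempty case, at the level of the character list
theorem pvMain_ne (cs : List Char) (hdomc : ∀ c ∈ cs, c.toNat ≤ 126) (hne : cs ≠ []) :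
    (match PySem.List.sorted (PySem.Dict.counter cs).items (fun x => x.1) false with
     | [] => true
     | p :: rest => if p.1 != 'a' then false else pvChainA (p :: rest))
    = pvWalkB (PySem.Dict.counter cs) (cs.length : Int) (cs.length + 1) 97 (cs.length : Int) 0 := by
  set ds := PySem.List.sorted (PySem.Set.ofList cs) (fun x => x) false with hds
  have hperm : ds.Perm (PySem.Set.ofList cs) := PySem.List.sorted_perm _ _ _
  have hp : ds.Pairwise (· < ·) := PySem.List.sorted_ofList_pairwise_lt cs
  have hmem : ∀ c, c ∈ ds ↔ c ∈ cs := by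
    intro c; rw [hds, PySem.List.mem_sorted, PySem.Set.mem_ofList]
  have hnd : ds.Nodup := hperm.nodup_iff.mpr (PySem.Set.nodup_ofList cs)
  have hcount : ∀ c : Char, 0 < cs.count c ↔ c ∈ ds := by
    intro c; rw [hmem]; exact List.count_pos_iff
  set lo := ds.takeWhile (fun c => decide (c.toNat < 97)) with hlo
  set hi := ds.dropWhile (fun c => decide (c.toNat < 97)) with hhi
  have hsplit : lo ++ hi = ds := List.takeWhile_append_dropWhile
  have hlo97 : ∀ c ∈ lo, c.toNat < 97 := by
    intro c hc; simpa using List.mem_takeWhile_imp hc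
  have hp' : (lo ++ hi).Pairwise (· < ·) := by rw [hsplit]; exact hp
  obtain ⟨plo, phi, pcross⟩ := List.pairwise_append.mp hp'
  have hhi97 : ∀ c ∈ hi, 97 ≤ c.toNat := by
    rcases hhing : hi with _ | ⟨h, t⟩
    · simp
    · intro c hc
      have hnenil : ds.dropWhile (fun c => decide (c.toNat < 97)) ≠ [] := by
        rw [← hhi, hhing]; simp
      have hh := List.head_dropWhile_not (fun c : Char => decide (c.toNat < 97)) hnenil
      have h1 : (List.dropWhile (fun c : Char => decide (c.toNat < 97)) ds).head? = some h := by
        rw [← hhi, hhing]; rfl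
      rw [List.head?_eq_some_head hnenil] at h1
      rw [Option.some.injEq] at h1
      rw [h1] at hh
      simp only [decide_eq_false_iff_not, not_lt] at hh
      rcases List.mem_cons.mp hc with rfl | hct
      · exact hh
      · have : h < c := by
          have := phi; rw [hhing] at this
          exact (List.pairwise_cons.mp this).1 c hct
        have := (pvChar_lt_iff h c).mp this
        omega
  have hsumall : ((lo.map (fun c => (cs.count c : Int))).sum
      + (hi.map (fun c => (cs.count c : Int))).sum) = (cs.length : Int) := by
    rw [← List.sum_append, ← List.map_append, hsplit]
    exact pvSum_counts cs ds hnd hmem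
  have hdslen : ds.length ≤ cs.length := by
    rw [hperm.length_eq]
    exact (List.subperm_of_subset (PySem.Set.nodup_ofList cs)
      (fun c hc => (PySem.Set.mem_ofList cs c).mp hc)).length_le
  have hfuel : hi.length < cs.length + 1 := by
    have := (List.dropWhile_sublist (l := ds) (fun c => decide (c.toNat < 97))).length_le
    rw [← hhi] at this
    omega
  -- B's walk, via the walk lemma
  rw [pvWalk_eq cs lo hi (cs.length + 1) 97 (cs.length : Int) 0
        phi
        (fun c hc => (hcount c).mpr (by rw [← hsplit]; exact List.mem_append_right _ hc))
        (fun c hc => (hcount c).mpr (by rw [← hsplit]; exact List.mem_append_left _ hc))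
        (by intro c h97c hnm
            by_contra h0
            have hpos : 0 < cs.count c := Nat.pos_of_ne_zero h0
            have : c ∈ lo ++ hi := by rw [hsplit]; exact (hcount c).mp hpos
            rcases List.mem_append.mp this with h | h
            · have := hlo97 c h; omega
            · exact hnm h)
        (by intro c hc
            refine ⟨hhi97 c hc, hdomc c ?_⟩
            rw [← hmem, ← hsplit]
            exact List.mem_append_right _ hc)
        (le_refl 97) (by omega)
        (by rw [zero_add]; exact hsumall)
        hfuel]
  -- A's sorted item list
  rw [pvSorted_items cs, ← hds, ← hsplit]
  rcases hlon : lo with _ | ⟨x, xs⟩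
  · rcases hhin : hi with _ | ⟨h, t⟩
    · -- ds = [], impossible: cs is nonempty
      exfalso
      rcases List.exists_mem_of_ne_nil cs hne with ⟨c, hc⟩
      have : c ∈ lo ++ hi := by rw [hsplit]; exact (hmem c).mpr hc
      rw [hlon, hhin] at this
      simp at this
    · simp only [List.nil_append, List.map_cons]
      by_cases hha : h = 'a'
      · subst hha
        have hphi : ('a' :: t).Pairwise (· < ·) := by rw [← hhin]; exact phi
        have hcle : ((cs.count 'a' : Int)) ≤ (cs.length : Int) := by
          exact_mod_cast List.count_le_length
        simp only [bne_self_eq_false, Bool.false_eq_true, if_false]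
        rw [pvChain_eq (fun c => (cs.count c : Int)) t 'a' hphi]
        simp only [pvChainB]
        rw [if_pos ⟨by decide, hcle⟩]
        simp
      · have hbne : (h != 'a') = true := by simp [hha]
        have h97 : h.toNat ≠ 97 := by
          intro he
          apply hha
          have := congrArg Char.ofNat he
          rwa [Char.ofNat_toNat] at this
        simp only [hbne, if_true]
        simp only [pvChainB]
        rw [if_neg (by intro hcond; exact h97 hcond.1)]
        simp
  · -- a character below 'a' exists: both sides are False
    simp only [List.cons_append, List.map_cons]
    have hx : x ∈ lo := by rw [hlon]; simp
    have hxa : (x != 'a') = true := by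
      have := hlo97 x hx
      simp only [bne_iff_ne, ne_eq]
      intro he; rw [he] at this; simp at this
    simp [hxa]

theorem pvMain (s : String) (hdom : Dom_is_beautiful_str s) :
    is_beautiful_str s = is_beautiful_str_alt s := by
  have hdomc : ∀ c ∈ s.toList, c.toNat ≤ 126 := by
    unfold Dom_is_beautiful_str pvDomStr at hdom
    intro c hc
    have h := List.all_eq_true.mp hdom c hc
    unfold pvDomChar at h
    simp only [Bool.or_eq_true, Bool.and_eq_true, decide_eq_true_eq, beq_iff_eq] at h
    omega
  by_cases hlen : s.toList.length = 0
  · have hnil : s.toList = [] := List.length_eq_zero_iff.mp hlen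
    simp only [is_beautiful_str, is_beautiful_str_alt, hnil]
    rfl
  · have hne : s.toList ≠ [] := fun h => hlen (by simp [h])
    simp only [is_beautiful_str, is_beautiful_str_alt, if_neg hlen]
    exact pvMain_ne s.toList hdomc hne

-- ===== VERDICT (by name: the statement is the Claim_ definition above) =====
theorem is_beautiful_str_spec : Claim_equal_is_beautiful_str := by
  intro s hdom
  exact pvMain s hdom
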